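-- pv_equiv track=rewrite | github.com/raberin/hackerrank-questions | PY/array_subsets.py | subsetA
-- ===== SOURCE A (Python) =====
-- def subsetA(arr):
--     mapped = arr
--     cache = {'subset_sum': 0}
--     subset_a = []
--     while cache['subset_sum'] < sum(mapped):
--         # Grab 1st highest num
--         biggest = mapped.index(max(mapped))
--         cache['subset_sum'] += mapped[biggest]
--         # Remove it and put in subset
--         subset_a.append(mapped.pop(biggest))
--     return sorted(subset_a)
-- ===== SOURCE B (Python) =====
-- def subsetA(arr):
--     # Same return value as A; A also empties its argument via pop(), B does not mutate it.
--     total = sum(arr)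
--     if total <= 0:
--         return []  # the scan below would pick nothing
--     asc = sorted(arr)
--     acc = 0
--     k = len(asc)
--     while 2 * acc < total:
--         k -= 1
--         acc += asc[k]
--     return asc[k:]
-- ===== Notes on version B (the rewrite author's own statement) =====
-- stated objective: alternative
-- what changed: Replaced the repeated max()+index()+pop() selection loop by one ascending sort followed by a single suffix scan: the picked elements are exactly the shortest suffix of the sorted list whose sum acc satisfies 2*acc >= total, returned without a final re-sort (and nothing is picked when total <= 0).
import Mathlib
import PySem

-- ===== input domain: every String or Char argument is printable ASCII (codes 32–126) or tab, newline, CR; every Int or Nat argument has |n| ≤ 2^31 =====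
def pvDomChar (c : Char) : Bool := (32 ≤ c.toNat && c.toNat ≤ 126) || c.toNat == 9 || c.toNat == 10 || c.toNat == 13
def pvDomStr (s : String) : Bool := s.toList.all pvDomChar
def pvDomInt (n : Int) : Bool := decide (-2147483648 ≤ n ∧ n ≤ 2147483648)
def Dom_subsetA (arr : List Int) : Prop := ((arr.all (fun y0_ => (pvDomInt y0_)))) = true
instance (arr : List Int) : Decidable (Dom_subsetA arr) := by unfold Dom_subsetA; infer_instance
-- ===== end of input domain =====

-- B replaces A's repeated max/index/pop selection loop by one ascending sort and a single
-- suffix scan (objective: alternative algorithm). Equivalence is about the RETURN value only: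
-- A empties its argument list in place via pop(); B does not mutate it.

-- ===== PORT A =====
-- A's while loop; `fuel` = length of `mapped` bounds the iterations (each pop removes one element).
-- The branches returning `sorted subset` without recursing are exactly where Python would raise
-- (max()/pop on an empty list) or where fuel runs out; all are unreachable from subsetA's initial
-- state, so the transliteration is exact.
def subsetALoop : Nat → List Int → Int → List Int → List Int
  | fuel, mapped, cacheSum, subset =>
    if cacheSum < mapped.sum then
      match fuel with
      | 0 => PySem.List.sorted subset (fun x => x) false
      | f + 1 =>
        match PySem.List.max? mapped (fun x => x) with
        | none => PySem.List.sorted subset (fun x => x) false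
        | some m =>
          match PySem.List.index? mapped m with
          | none => PySem.List.sorted subset (fun x => x) false
          | some biggest =>
            match PySem.List.pop? mapped (biggest : Int) with
            | none => PySem.List.sorted subset (fun x => x) false
            | some (x, rest) => subsetALoop f rest (cacheSum + x) (subset ++ [x])
    else PySem.List.sorted subset (fun x => x) false

-- cache = {'subset_sum': 0} holds a single fixed key; its value is carried as the Int `cacheSum`.
def subsetA (arr : List Int) : List Int := subsetALoop arr.length arr 0 []

-- ===== PORT B =====
-- Source B's countdown loop: `while 2*acc < total: k -= 1; acc += asc[k]`.  The index k-1 is always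
-- in range (proved in the lemmas), so pyGetD with default 0 is exact; the k = 0 branch is
-- unreachable for the initial state subsetA_alt supplies.
def subsetBLoop (asc : List Int) (total : Int) : Nat → Int → Nat
  | k, acc =>
    if 2 * acc < total then
      match k with
      | 0 => 0
      | k' + 1 => subsetBLoop asc total k' (acc + PySem.List.pyGetD asc (k' : Int) 0)
    else k

def subsetA_alt (arr : List Int) : List Int :=
  let total := arr.sum
  if total ≤ 0 then []
  else
    let asc := PySem.List.sorted arr (fun x => x) false
    let k := subsetBLoop asc total asc.length 0
    PySem.List.slice asc (some (k : Int)) none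

-- ===== PRECONDITION & SPEC =====
def Spec_subsetA (arr : List Int) (out : List Int) : Prop := out = subsetA_alt arr
instance (arr : List Int) (out : List Int) : Decidable (Spec_subsetA arr out) := by unfold Spec_subsetA; infer_instance

-- ===== CLAIM (what is proved, stated in full; the proofs are below) =====
def Claim_equal_subsetA : Prop := ∀ (arr : List Int), Dom_subsetA arr → Spec_subsetA arr (subsetA arr)

-- ===== LEMMAS AND PROOFS =====

-- number of elements A's loop still picks from remaining list l given accumulated sum c
def pickLen : List Int → Int → Nat
  | [], _ => 0
  | h :: t, c => if c < (h :: t).sum then pickLen t (c + h) + 1 else 0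

theorem pickLen_le (l : List Int) (c : Int) : pickLen l c ≤ l.length := by
  induction l generalizing c with
  | nil => simp [pickLen]
  | cons h t ih =>
    simp only [pickLen]
    split
    · exact Nat.succ_le_succ (ih _)
    · simp

-- the value of max() is permutation-invariant
theorem max?_id_perm {l₁ l₂ : List Int} (hp : l₁.Perm l₂) :
    PySem.List.max? l₁ (fun x => x) = PySem.List.max? l₂ (fun x => x) := by
  by_cases hnil : l₁ = []
  · subst hnil
    have h2 : l₂ = [] := hp.symm.eq_nil
    subst h2
    rfl
  · have h2nil : l₂ ≠ [] := fun h => hnil (by rw [h] at hp; exact hp.eq_nil)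
    cases h1 : PySem.List.max? l₁ (fun x => x) with
    | none => exact absurd ((PySem.List.max?_eq_none_iff _ _).mp h1) hnil
    | some m1 =>
      cases h2 : PySem.List.max? l₂ (fun x => x) with
      | none => exact absurd ((PySem.List.max?_eq_none_iff _ _).mp h2) h2nil
      | some m2 =>
        have hm1 := PySem.List.max?_mem h1
        have hm2 := PySem.List.max?_mem h2
        have h12 := PySem.List.max?_isMax h1 m2 (hp.mem_iff.mpr hm2)
        have h21 := PySem.List.max?_isMax h2 m1 (hp.mem_iff.mp hm1)
        simp only [Option.some.injEq]
        exact le_antisymm h21 h12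

-- popping at the index of the max removes the first occurrence: pop?(index?(m)) = (m, l.erase m)
theorem pop_at_index (l : List Int) (m : Int) (i : Nat) (hi : PySem.List.index? l m = some i) :
    PySem.List.pop? l (i : Int) = some (m, l.erase m) := by
  obtain ⟨pre, suf, hdec, hlen, hnot⟩ := (PySem.List.index?_eq_some_iff l m i).mp hi
  obtain ⟨hk, hv, _⟩ := PySem.List.getElem_of_index?_eq_some hi
  rw [PySem.List.pop?_natCast l i hk, hv]
  congr 1
  rw [hdec, List.eraseIdx_append, ← hlen, if_neg (lt_irrefl _), Nat.sub_self,
    List.eraseIdx_cons_zero, List.erase_append_right _ hnot, List.erase_cons_head]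

-- A's loop result only depends on the multiset of `mapped`
theorem subsetALoop_perm (fuel : Nat) :
    ∀ (l₁ l₂ : List Int) (c : Int) (s : List Int), l₁.Perm l₂ →
      subsetALoop fuel l₁ c s = subsetALoop fuel l₂ c s := by
  induction fuel with
  | zero =>
    intro l₁ l₂ c s hp
    simp only [subsetALoop, hp.sum_eq]
  | succ f ih =>
    intro l₁ l₂ c s hp
    simp only [subsetALoop, hp.sum_eq]
    split
    · rw [max?_id_perm hp]
      cases hm : PySem.List.max? l₂ (fun x => x) with
      | none => rfl
      | some m =>
        have hmem2 : m ∈ l₂ := PySem.List.max?_mem hm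
        have hmem1 : m ∈ l₁ := hp.mem_iff.mpr hmem2
        obtain ⟨i1, hi1⟩ := Option.isSome_iff_exists.mp ((PySem.List.index?_isSome_iff _ _).mpr hmem1)
        obtain ⟨i2, hi2⟩ := Option.isSome_iff_exists.mp ((PySem.List.index?_isSome_iff _ _).mpr hmem2)
        simp only [hi1, hi2, pop_at_index l₁ m i1 hi1, pop_at_index l₂ m i2 hi2]
        exact ih _ _ _ _ (hp.erase m)
    · rfl

-- on a descending-sorted list A's loop takes the prefix of length pickLen
theorem subsetALoop_desc (fuel : Nat) :
    ∀ (d : List Int) (c : Int) (s : List Int),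
      d.Pairwise (fun a b => b ≤ a) → d.length ≤ fuel →
      subsetALoop fuel d c s =
        PySem.List.sorted (s ++ d.take (pickLen d c)) (fun x => x) false := by
  induction fuel with
  | zero =>
    intro d c s _ hlen
    have hd : d = [] := List.eq_nil_of_length_eq_zero (Nat.le_zero.mp hlen)
    subst hd
    simp [subsetALoop, pickLen]
  | succ f ih =>
    intro d c s hpw hlen
    cases d with
    | nil => simp [subsetALoop, pickLen, PySem.List.max?]
    | cons h t =>
      simp only [subsetALoop]
      by_cases hc : c < (h :: t).sum
      · rw [if_pos hc]
        have hmax : PySem.List.max? (h :: t) (fun x => x) = some h := by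
          cases hm : PySem.List.max? (h :: t) (fun x => x) with
          | none => rw [PySem.List.max?_eq_none_iff] at hm; exact absurd hm (by simp)
          | some m =>
            have hmem := PySem.List.max?_mem hm
            have hle := PySem.List.max?_isMax hm h (by simp)
            have hge : m ≤ h := by
              rcases List.mem_cons.mp hmem with rfl | hmt
              · exact le_refl _
              · exact (List.pairwise_cons.mp hpw).1 m hmt
            simp [le_antisymm hge hle]
        simp only [hmax, PySem.List.index?_cons_self, Nat.cast_zero, PySem.List.pop?_zero_cons]
        rw [ih t (c + h) (s ++ [h]) (List.pairwise_cons.mp hpw).2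
              (Nat.le_of_succ_le_succ (by simpa using hlen))]
        have hp : pickLen (h :: t) c = pickLen t (c + h) + 1 := by
          simp only [pickLen]
          rw [if_pos hc]
        rw [hp, List.take_succ_cons]
        simp
      · rw [if_neg hc]
        have h0 : pickLen (h :: t) c = 0 := by
          simp only [pickLen]
          rw [if_neg hc]
        rw [h0]
        simp

-- B's countdown loop counts how many largest elements remain unpicked
theorem subsetBLoop_eq (asc : List Int) :
    ∀ (k : Nat) (acc : Int), k ≤ asc.length → acc + (asc.take k).sum = asc.sum →
      subsetBLoop asc asc.sum k acc = k - pickLen ((asc.take k).reverse) acc := by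
  intro k
  induction k with
  | zero =>
    intro acc _ _
    simp only [subsetBLoop, List.take_zero, List.reverse_nil, pickLen]
    split <;> rfl
  | succ k' ih =>
    intro acc hk hsum
    have hk' : k' < asc.length := Nat.lt_of_succ_le hk
    have htake : asc.take (k' + 1) = asc.take k' ++ [asc[k']] := by
      rw [List.take_add_one, List.getElem?_eq_getElem hk']
      rfl
    have hrev : (asc.take (k' + 1)).reverse = asc[k'] :: (asc.take k').reverse := by
      rw [htake]; simp
    have hsum' : (asc.take (k' + 1)).sum = (asc.take k').sum + asc[k'] := by
      rw [htake, List.sum_append, List.sum_cons, List.sum_nil, add_zero]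
    have hcond : (2 * acc < asc.sum) ↔ (acc < ((asc.take (k' + 1)).reverse).sum) := by
      rw [List.sum_reverse]
      omega
    simp only [subsetBLoop]
    by_cases hc : 2 * acc < asc.sum
    · rw [if_pos hc]
      have hget : PySem.List.pyGetD asc ((k' : Nat) : Int) 0 = asc[k'] := by
        rw [PySem.List.pyGetD_natCast]
        simp [List.getD_eq_getElem?_getD, List.getElem?_eq_getElem hk']
      rw [hget, ih (acc + asc[k']) (Nat.le_of_lt hk') (by omega)]
      have hlt : acc < (asc[k'] :: (asc.take k').reverse).sum := by
        rw [← hrev]; exact hcond.mp hc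
      have hpick : pickLen ((asc.take (k' + 1)).reverse) acc =
          pickLen ((asc.take k').reverse) (acc + asc[k']) + 1 := by
        rw [hrev]
        simp only [pickLen]
        rw [if_pos hlt]
      rw [hpick]
      have := pickLen_le ((asc.take k').reverse) (acc + asc[k'])
      simp only [List.length_reverse, List.length_take] at this
      omega
    · rw [if_neg hc]
      have hnlt : ¬ acc < (asc[k'] :: (asc.take k').reverse).sum := by
        rw [← hrev]; exact fun h => hc (hcond.mpr h)
      have hpick : pickLen ((asc.take (k' + 1)).reverse) acc = 0 := by
        rw [hrev]
        simp only [pickLen]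
        rw [if_neg hnlt]
      rw [hpick]
      omega

-- ===== VERDICT (by name: the statement is the Claim_ definition above) =====
theorem subsetA_spec : Claim_equal_subsetA := by
  intro arr _
  unfold Spec_subsetA subsetA subsetA_alt
  by_cases htot : arr.sum ≤ 0
  · rw [if_pos htot]
    unfold subsetALoop
    rw [if_neg (not_lt.mpr htot)]
    rfl
  rw [if_neg htot]
  set asc := PySem.List.sorted arr (fun x => x) false with hasc
  set n := asc.length with hn
  have hlen : asc.length = arr.length := by rw [hasc]; exact PySem.List.length_sorted ..
  have hperm : arr.Perm asc.reverse :=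
    ((PySem.List.sorted_perm arr (fun x => x) false).symm.trans asc.reverse_perm.symm)
  have hpw : asc.Pairwise (fun a b : Int => a ≤ b) := PySem.List.sorted_pairwise ..
  have hpwr : asc.reverse.Pairwise (fun a b : Int => b ≤ a) := by
    rw [List.pairwise_reverse]; exact hpw
  have h1 : subsetALoop arr.length arr 0 [] = subsetALoop arr.length asc.reverse 0 [] :=
    subsetALoop_perm arr.length arr asc.reverse 0 [] hperm
  have h2 : subsetALoop arr.length asc.reverse 0 [] =
      PySem.List.sorted (asc.reverse.take (pickLen asc.reverse 0)) (fun x => x) false := by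
    rw [subsetALoop_desc arr.length asc.reverse 0 [] hpwr (by simp [hlen])]
    rw [List.nil_append]
  set j := pickLen asc.reverse 0 with hj
  have h3 : asc.reverse.take j = (asc.drop (n - j)).reverse := List.take_reverse
  have h4 : PySem.List.sorted ((asc.drop (n - j)).reverse) (fun x => x) false =
      asc.drop (n - j) :=
    PySem.List.sorted_id_eq_of_perm_of_pairwise _ _
      (asc.drop (n - j)).reverse_perm.symm hpw.drop
  have hsumeq : arr.sum = asc.sum := ((PySem.List.sorted_perm arr (fun x => x) false).sum_eq).symm
  have h5 : subsetBLoop asc asc.sum n 0 = n - j := by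
    rw [subsetBLoop_eq asc n 0 le_rfl (by simp [hn])]
    congr 1
    rw [hj, hn, List.take_length]
  rw [h1, h2, h3, h4]
  show List.drop (n - j) asc =
    PySem.List.slice asc (some ((subsetBLoop asc arr.sum n 0 : Nat) : Int)) none
  rw [hsumeq, h5, PySem.List.slice_from_natCast]
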